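-- pv_equiv track=rewrite | github.com/Sunty2K/9A1-2024-2025 | p503_chat.py | solve
-- ===== SOURCE A (Python) =====
-- def solve(n, m, k, s):
--     s = list(s)
--     ans = 0
--     i = 0
--     while i <= n - m:
--         # Kiểm tra đoạn dài m có toàn là '0'
--         if all(s[j] == '0' for j in range(i, i + m)):
--             # Thao tác tại vị trí i + m - k để đảm bảo phần cuối của đoạn m bị xóa
--             pos = min(i + m - 1, n - 1) - k + 1
--             pos = max(pos, i)  # Đảm bảo không ra ngoài bên trái
--             for j in range(pos, min(pos + k, n)):
--                 s[j] = '1'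
--             ans += 1
--             i = pos + k  # Bỏ qua đoạn đã xử lý
--         else:
--             i += 1
--     return ans
-- ===== SOURCE B (Python) =====
-- def solve(n, m, k, s):
--     # Single pass with a running count of consecutive zeros instead of
--     # re-scanning a length-m window at every position.
--     if n < m:
--         return 0
--     ans = 0
--     run = 0
--     j = 0
--     while j < n:
--         if s[j] == '0':
--             run += 1
--             if run == m:
--                 ans += 1
--                 run = 0
--                 j += max(k - m, 0)
--         else:
--             run = 0
--         j += 1
--     return ans
-- ===== Notes on version B (the rewrite author's own statement) =====
-- stated objective: alternative
-- what changed: A re-scans a length-m window at every position and mutates a list copy of s; B makes a single left-to-right pass keeping a running count of consecutive zeros, firing an operation when the count reaches m and jumping the scan index, with no mutation at all.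
-- outside the precondition, e.g. on solve(3, 0, 2, '000'): A returns 2, B returns 0; on solve(1, 0, 0, '0'): A does not finish within the time limit, B returns 0; on solve(6, 4, 2, '11111'): A returns 0, B raises IndexError
import Mathlib
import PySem

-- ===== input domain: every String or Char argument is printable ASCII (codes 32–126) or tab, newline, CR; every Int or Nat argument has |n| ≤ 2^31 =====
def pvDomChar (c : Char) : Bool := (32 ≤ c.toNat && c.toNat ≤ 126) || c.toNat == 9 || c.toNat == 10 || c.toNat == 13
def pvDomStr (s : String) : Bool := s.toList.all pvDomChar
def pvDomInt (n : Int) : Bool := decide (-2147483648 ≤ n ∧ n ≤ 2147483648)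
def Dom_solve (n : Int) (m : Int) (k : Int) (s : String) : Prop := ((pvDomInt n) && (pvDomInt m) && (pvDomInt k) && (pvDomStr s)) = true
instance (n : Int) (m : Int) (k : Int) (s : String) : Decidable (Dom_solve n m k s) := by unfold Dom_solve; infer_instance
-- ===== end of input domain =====

-- B replaces A's per-position window re-scan by a single pass with a running count of
-- consecutive zeros (objective: alternative; intended as faster, a timing run did
-- not confirm it consistently). A mutates only its local copy of s.

-- ===== PORT A =====
-- all(s[x] == '0' for x in range(j, j+cnt)): short-circuiting, like Python's all()
-- over a generator; indices are in range under Pre_solve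
def pvAllZero (s : List Char) (j : Int) (cnt : Nat) : Bool :=
  match cnt with
  | 0 => true
  | Nat.succ c => if PySem.List.pyGetD s j ' ' == '0' then pvAllZero s (j + 1) c else false

-- for j in range(a, b): s[j] = '1'; indices are nonnegative and in range under Pre_solve
def pvWriteOnes (s : List Char) (a b : Int) : List Char :=
  (PySem.List.pyRange a b 1).foldl (fun acc j => acc.set j.toNat '1') s

-- A's while-loop; fuel (n - m + 1).toNat only makes the recursion total: inside
-- Pre_solve i strictly increases over [0, n-m], so the fuel is never exhausted early.
def solveLoop (n m k : Int) (fuel : Nat) (s : List Char) (i ans : Int) : Int :=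
  match fuel with
  | 0 => ans
  | Nat.succ fuel =>
    if i ≤ n - m then
      if pvAllZero s i m.toNat then    -- range(i, i+m) has m.toNat elements
        let pos := max (min (i + m - 1) (n - 1) - k + 1) i
        solveLoop n m k fuel (pvWriteOnes s pos (min (pos + k) n)) (pos + k) (ans + 1)
      else
        solveLoop n m k fuel s (i + 1) ans
    else ans

def solve (n : Int) (m : Int) (k : Int) (s : String) : Int :=
  solveLoop n m k (n - m + 1).toNat s.toList 0 0

-- ===== PORT B =====
-- B's while-loop: one left-to-right pass, run = length of the current streak of '0's.
-- The fuel n.toNat only makes the recursion total: j strictly increases at every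
-- iteration, so the loop runs at most n times and the fuel is never exhausted early.
def solveAltLoop (n m k : Int) (t : List Char) (fuel : Nat) (j run ans : Int) : Int :=
  match fuel with
  | 0 => ans
  | Nat.succ fuel =>
    if j < n then
      if PySem.List.pyGetD t j ' ' == '0' then
        if run + 1 == m then
          solveAltLoop n m k t fuel (j + max (k - m) 0 + 1) 0 (ans + 1)
        else
          solveAltLoop n m k t fuel (j + 1) (run + 1) ans
      else
        solveAltLoop n m k t fuel (j + 1) 0 ans
    else ans

def solve_alt (n : Int) (m : Int) (k : Int) (s : String) : Int :=
  if n < m then 0 else solveAltLoop n m k s.toList n.toNat 0 0 0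

-- ===== PRECONDITION & SPEC =====
-- Pre_solve excludes (a) m ≤ 0 with m ≤ n, where A's empty all() makes every window
-- check vacuously true (A then counts windows of nothing, or loops forever when k ≤ 0),
-- and (b) n exceeding len(s) with m ≤ n, where the programs index past the string
-- (IndexError on almost all such inputs).
def Pre_solve (n : Int) (m : Int) (k : Int) (s : String) : Prop :=
  (1 ≤ m ∨ n < m) ∧ (m ≤ n → n ≤ PySem.Str.len s)
instance (n : Int) (m : Int) (k : Int) (s : String) : Decidable (Pre_solve n m k s) := by
  unfold Pre_solve; infer_instance

def pvWitness_solve : Int × Int × Int × String := (4, 2, 1, "0100")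

def Spec_solve (n : Int) (m : Int) (k : Int) (s : String) (out : Int) : Prop := out = solve_alt n m k s
instance (n : Int) (m : Int) (k : Int) (s : String) (out : Int) : Decidable (Spec_solve n m k s out) := by unfold Spec_solve; infer_instance

-- ===== CLAIM (what is proved, stated in full; the proofs are below) =====
def Claim_equal_solve : Prop := ∀ (n : Int) (m : Int) (k : Int) (s : String), Dom_solve n m k s → Pre_solve n m k s → Spec_solve n m k s (solve n m k s)

-- ===== LEMMAS AND PROOFS =====

-- once i has passed n - m, A's loop returns ans whatever the fuel
lemma loopA_exit (n m k : Int) (fuel : Nat) (s : List Char) (i ans : Int)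
    (h : n - m < i) : solveLoop n m k fuel s i ans = ans := by
  cases fuel with
  | zero => rfl
  | succ f => simp only [solveLoop, if_neg (by omega : ¬ i ≤ n - m)]

-- the window check succeeds when every inspected position holds '0'
lemma allZero_of (s : List Char) :
    ∀ (cnt : Nat) (j : Int),
      (∀ x : Int, j ≤ x → x < j + cnt → PySem.List.pyGetD s x ' ' = '0') →
      pvAllZero s j cnt = true := by
  intro cnt
  induction cnt with
  | zero => intro j _; rfl
  | succ c ih =>
    intro j h
    have hj : PySem.List.pyGetD s j ' ' = '0' := h j (le_refl j) (by push_cast; omega)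
    simp only [pvAllZero, hj, if_pos, beq_self_eq_true]
    apply ih
    intro x hx1 hx2
    exact h x (by omega) (by push_cast at hx2 ⊢; omega)

-- the window check fails as soon as some inspected position is not '0'
lemma allZero_false_of (s : List Char) :
    ∀ (cnt : Nat) (j x : Int), j ≤ x → x < j + cnt →
      ¬ (PySem.List.pyGetD s x ' ' == '0') = true →
      pvAllZero s j cnt = false := by
  intro cnt
  induction cnt with
  | zero => intro j x h1 h2 _; push_cast at h2; omega
  | succ c ih =>
    intro j x h1 h2 hbad
    by_cases hj : (PySem.List.pyGetD s j ' ' == '0') = true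
    · simp only [pvAllZero, hj, if_pos]
      have hxj : x ≠ j := fun he => hbad (he ▸ hj)
      exact ih (j + 1) x (by omega) (by push_cast at h2 ⊢; omega) hbad
    · simp only [pvAllZero, hj]
      simp

-- writing '1's does not change the length
lemma writeOnes_length (l : List Int) (s : List Char) :
    (l.foldl (fun acc j => acc.set j.toNat '1') s).length = s.length := by
  induction l generalizing s with
  | nil => rfl
  | cons x l ih => simpa [List.foldl] using ih (s.set x.toNat '1')

-- reading at p is unchanged by a single set at an index below p
lemma getD_set_lt (xs : List Char) (a : Nat) (v : Char) (p : Int)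
    (hp : 0 ≤ p) (ha : (a : Int) < p) :
    PySem.List.pyGetD (xs.set a v) p ' ' = PySem.List.pyGetD xs p ' ' := by
  by_cases hlt : p < (xs.length : Int)
  · rw [PySem.List.pyGetD_eq_getElem _ _ hp (by simpa using hlt),
        PySem.List.pyGetD_eq_getElem _ _ hp hlt]
    exact List.getElem_set_ne (by omega) _
  · rw [PySem.List.pyGetD_of_none, PySem.List.pyGetD_of_none]
    · rw [PySem.List.pyGet?_eq_none_iff]
      intro hIn
      rcases hIn with ⟨_, h2⟩
      omega
    · rw [PySem.List.pyGet?_eq_none_iff]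
      intro hIn
      rcases hIn with ⟨_, h2⟩
      simp [List.length_set] at h2
      omega

-- folding writes at indices below p does not change the read at p
lemma writeFold_getD (p : Int) (hp : 0 ≤ p) :
    ∀ (l : List Int) (s : List Char), (∀ j ∈ l, 0 ≤ j ∧ j < p) →
      PySem.List.pyGetD (l.foldl (fun acc j => acc.set j.toNat '1') s) p ' '
        = PySem.List.pyGetD s p ' ' := by
  intro l
  induction l with
  | nil => intro s _; rfl
  | cons x l ih =>
    intro s hmem
    have hx := hmem x (by simp)
    simp only [List.foldl]
    rw [ih (s.set x.toNat '1') (fun j hj => hmem j (by simp [hj]))]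
    exact getD_set_lt s x.toNat '1' p hp (by omega)

-- reading at p ≥ b is unchanged by writing '1' on [a, b)
lemma writeOnes_getD_ge (s : List Char) (a b p : Int)
    (ha : 0 ≤ a) (hb : b ≤ p) (hp : 0 ≤ p) :
    PySem.List.pyGetD (pvWriteOnes s a b) p ' ' = PySem.List.pyGetD s p ' ' := by
  unfold pvWriteOnes
  apply writeFold_getD p hp
  intro j hj
  rw [PySem.List.mem_pyRange_one] at hj
  omega

-- once j has reached n, B's loop returns ans whatever the fuel
lemma loopB_exit (n m k : Int) (t : List Char) (fuel : Nat) (j run ans : Int)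
    (h : ¬ j < n) : solveAltLoop n m k t fuel j run ans = ans := by
  cases fuel with
  | zero => rfl
  | succ f => simp only [solveAltLoop, if_neg h]

-- A's loop result does not depend on the fuel, as long as there is enough of it
lemma fuelStable (n m k : Int) (hm : 1 ≤ m) :
    ∀ (f1 f2 : Nat) (s : List Char) (i ans : Int),
      (n - m + 1 - i).toNat ≤ f1 → (n - m + 1 - i).toNat ≤ f2 →
      solveLoop n m k f1 s i ans = solveLoop n m k f2 s i ans := by
  intro f1
  induction f1 with
  | zero =>
    intro f2 s i ans h1 h2
    have : n - m < i := by omega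
    rw [loopA_exit n m k _ _ _ _ this, loopA_exit n m k _ _ _ _ this]
  | succ f1 ih =>
    intro f2 s i ans h1 h2
    by_cases hc : i ≤ n - m
    · have hf2 : ∃ f2', f2 = f2' + 1 := by
        cases f2 with
        | zero => omega
        | succ f2' => exact ⟨f2', rfl⟩
      obtain ⟨f2', rfl⟩ := hf2
      simp only [solveLoop, if_pos hc]
      by_cases hz : pvAllZero s i m.toNat
      · simp only [hz, if_pos]
        have hmin : min (i + m - 1) (n - 1) = i + m - 1 := by omega
        apply ih
        · omega
        · omega
      · simp only [hz]
        simp only [Bool.false_eq_true, if_false]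
        apply ih <;> omega
    · rw [loopA_exit n m k _ _ _ _ (by omega), loopA_exit n m k _ _ _ _ (by omega)]

-- if s[jb] ≠ '0' and every window start in [i, jb] sees jb, A walks i up to jb + 1
lemma skipA (n m k : Int) (hm : 1 ≤ m) (s : List Char) (jb : Int)
    (hbad : ¬ (PySem.List.pyGetD s jb ' ' == '0') = true) :
    ∀ (c : Nat) (i : Int) (f1 f2 : Nat) (ans : Int),
      (jb + 1 - i).toNat ≤ c → i ≤ jb + 1 → jb - i < m →
      (n - m + 1 - i).toNat ≤ f1 → (n - m + 1 - (jb + 1)).toNat ≤ f2 →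
      solveLoop n m k f1 s i ans = solveLoop n m k f2 s (jb + 1) ans := by
  intro c
  induction c with
  | zero =>
    intro i f1 f2 ans hc hi hwin hf1 hf2
    have : i = jb + 1 := by omega
    subst this
    exact fuelStable n m k hm f1 f2 s _ ans hf1 hf2
  | succ c ih =>
    intro i f1 f2 ans hc hi hwin hf1 hf2
    by_cases heq : i = jb + 1
    · subst heq; exact fuelStable n m k hm f1 f2 s _ ans hf1 hf2
    · have hijb : i ≤ jb := by omega
      by_cases hout : n - m < i
      · rw [loopA_exit n m k _ _ _ _ hout, loopA_exit n m k _ _ _ _ (by omega)]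
      · have hf1pos : ∃ f1', f1 = f1' + 1 := by
          cases f1 with
          | zero => omega
          | succ f1' => exact ⟨f1', rfl⟩
        obtain ⟨f1', rfl⟩ := hf1pos
        have hz : pvAllZero s i m.toNat = false :=
          allZero_false_of s m.toNat i jb (by omega) (by push_cast; omega) hbad
        simp only [solveLoop, if_pos (by omega : i ≤ n - m), hz,
          Bool.false_eq_true, if_false]
        exact ih (i + 1) f1' f2 ans (by omega) (by omega) (by omega) (by omega) hf2

-- main simulation: A at pointer i = j - run equals B scanning at j with streak run
lemma mainSim (n m k : Int) (t : List Char) (hm : 1 ≤ m) :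
    ∀ (fb : Nat) (j run ans : Int) (sA : List Char) (fuel : Nat),
      (n - j).toNat ≤ fb →
      0 ≤ run → run < m → run ≤ j →
      (∀ p : Int, j - run ≤ p → p < j → PySem.List.pyGetD t p ' ' = '0') →
      sA.length = t.length →
      (∀ p : Int, j - run ≤ p → PySem.List.pyGetD sA p ' ' = PySem.List.pyGetD t p ' ') →
      (n - m + 1 - (j - run)).toNat ≤ fuel →
      solveLoop n m k fuel sA (j - run) ans = solveAltLoop n m k t fb j run ans := by
  intro fb
  induction fb with
  | zero =>
    intro j run ans sA fuel hjn h0 hrm hrj hz hlen hag hfuel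
    exact loopA_exit n m k fuel sA _ ans (by omega)
  | succ fb ih =>
    intro j run ans sA fuel hjn h0 hrm hrj hz hlen hag hfuel
    by_cases hjlt : j < n
    · simp only [solveAltLoop, if_pos hjlt]
      by_cases hc : (PySem.List.pyGetD t j ' ' == '0') = true
      · rw [if_pos hc]
        by_cases hfire : run + 1 = m
        · -- the streak reaches m: A's window check at i = j - run succeeds and A fires
          rw [if_pos (by simpa using hfire)]
          obtain ⟨f, rfl⟩ : ∃ f, fuel = f + 1 := by
            cases fuel with
            | zero => omega
            | succ f => exact ⟨f, rfl⟩
          have hile : j - run ≤ n - m := by omega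
          have hall : pvAllZero sA (j - run) m.toNat = true := by
            apply allZero_of
            intro x hx1 hx2
            push_cast at hx2
            rw [hag x (by omega)]
            by_cases hxj : x = j
            · subst hxj; exact (beq_iff_eq).mp hc
            · rw [hz x (by omega) (by omega)]
          simp only [solveLoop, if_pos hile, hall, if_pos]
          have hmin : min (j - run + m - 1) (n - 1) = j - run + m - 1 := by omega
          set pos := max (min (j - run + m - 1) (n - 1) - k + 1) (j - run) with hpos
          have hposge : j - run ≤ pos := le_max_right _ _
          have hposk : pos + k = j + max (k - m) 0 + 1 := by
            have h1 := le_max_right (k - m) (0 : Int)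
            have h2 := le_max_left (k - m) (0 : Int)
            rw [hpos, hmin]; omega
          rw [hposk]
          have hrec := ih (j + max (k - m) 0 + 1) 0 (ans + 1)
            (pvWriteOnes sA pos (min (j + max (k - m) 0 + 1) n)) f
          rw [show j + max (k - m) 0 + 1 - (0 : Int) = j + max (k - m) 0 + 1 from by omega]
            at hrec
          apply hrec
          · have := le_max_right (k - m) (0 : Int); omega
          · omega
          · omega
          · have := le_max_right (k - m) (0 : Int); omega
          · intro p h1 h2; omega
          · unfold pvWriteOnes; rw [writeOnes_length]; exact hlen
          · intro p hp
            rw [writeOnes_getD_ge sA pos _ p (by omega)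
                  (by have := min_le_left (pos + k) n; omega) (by omega)]
            exact hag p (by omega)
          · have := le_max_right (k - m) (0 : Int); omega
        · -- the streak grows: A's state is untouched, only B advances
          rw [if_neg (by simpa using hfire)]
          have hswap : j - run = (j + 1) - (run + 1) := by omega
          rw [hswap]
          apply ih
          · omega
          · omega
          · omega
          · omega
          · intro p h1 h2
            by_cases hpj : p = j
            · subst hpj; exact (beq_iff_eq).mp hc
            · exact hz p (by omega) (by omega)
          · exact hlen
          · intro p hp; exact hag p (by omega)
          · omega
      · -- a blocker at j: A walks i from j - run up to j + 1 window by window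
        rw [if_neg hc]
        have hbad : ¬ (PySem.List.pyGetD sA j ' ' == '0') = true := by
          rw [hag j (by omega)]; exact hc
        rw [skipA n m k hm sA j hbad (j + 1 - (j - run)).toNat (j - run) fuel
              ((n - m + 1 - (j + 1)).toNat) ans (le_refl _) (by omega) (by omega) hfuel
              (le_refl _)]
        have hrec := ih (j + 1) 0 ans sA ((n - m + 1 - (j + 1)).toNat)
        rw [show j + 1 - (0 : Int) = j + 1 from by omega] at hrec
        apply hrec
        · omega
        · omega
        · omega
        · omega
        · intro p h1 h2; omega
        · exact hlen
        · intro p hp; exact hag p (by omega)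
        · omega
    · rw [loopB_exit n m k t _ _ _ _ hjlt]
      exact loopA_exit n m k fuel sA _ ans (by omega)

-- ===== VERDICT (by name: the statement is the Claim_ definition above) =====
theorem solve_spec : Claim_equal_solve := by
  intro n m k s _hdom hpre
  unfold Spec_solve solve solve_alt
  by_cases hnm : n < m
  · rw [if_pos hnm]
    have : (n - m + 1).toNat = 0 := by omega
    rw [this]
    rfl
  · rw [if_neg hnm]
    have hm : 1 ≤ m := by
      rcases hpre.1 with h | h
      · exact h
      · exact absurd h hnm
    have h0 : (0 : Int) = 0 - 0 := by norm_num
    calc solveLoop n m k (n - m + 1).toNat s.toList 0 0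
        = solveLoop n m k (n - m + 1).toNat s.toList (0 - 0) 0 := by norm_num
      _ = solveAltLoop n m k s.toList n.toNat 0 0 0 := by
          apply mainSim n m k s.toList hm n.toNat 0 0 0 s.toList
          · omega
          · omega
          · omega
          · omega
          · intro p h1 h2; omega
          · rfl
          · intro p _; rfl
          · omega
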